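-- pv_equiv track=rewrite | github.com/alvarodca/MachineLearning-Snake | ml problems.py | closest_body_points
-- ===== SOURCE A (Python) =====
-- def distances_to_head(head_x: int, head_y: int, snake_body: list[int]) -> tuple:
--     """
--     Computes the distance of each of the body parts of the snake to the head
--     """
--     # Initializing an empty list
--     distances = []
--
--     # Obtaining the distance between the body to each point
--     for x,y in snake_body[:4]: # Computes it for the first 4 points
--         dist = (x-head_x)**2 + (y-head_y)**2 # Calculating squared distance
--         # Ensures the distance of the head is not saved as closest point
--         if dist != 0:
--             distances.append((dist,x,y))
--
--
--     return distances
--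
-- def closest_body_points(head_x: int, head_y: int, snake_body: list[int]) -> tuple:
--     """
--     Takes the position of the head of the snake and its body and returns the distance to
--     4 closest body points to the head
--     """
--     # Initializing an empty list
--     distances = distances_to_head(head_x, head_y, snake_body)
--
--     # Obtaining the 4 closest distances, if the list is smaller it will only return the existent values
--     #closest = distances[:4]
--
--     # Returning the x and y coordinates
--     closest_x = []
--     closest_y = []
--
--     for elem in distances:
--         if elem: # Checks the element is not none
--             dist, x, y = elem
--             closest_x.append(x)
--             closest_y.append(y)
--
--     # Makes sure the list is of length of 4
--     while len(closest_x) < 4: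
--        closest_x.append(100_000)
--        closest_y.append(100_000)
--
--     return closest_x, closest_y
-- ===== SOURCE B (Python) =====
-- def closest_body_points(head_x, head_y, snake_body):
--     # Recursive descent over the first four body points carrying the number of
--     # still-unfilled slots; the padding appears at the base case and kept
--     # coordinates are consed on the way back up -- no intermediate list is built.
--     def go(pts, slots):
--         if not pts:
--             return [100_000] * slots, [100_000] * slots
--         (x, y) = pts[0]
--         if x == head_x and y == head_y:
--             return go(pts[1:], slots)
--         xs, ys = go(pts[1:], slots - 1)
--         return [x] + xs, [y] + ys
--     return go(snake_body[:4], 4)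
-- ===== Notes on version B (the rewrite author's own statement) =====
-- stated objective: alternative
-- what changed: Replaces A's three staged passes (build a (dist,x,y) tuple list, loop again to unpack it, while-loop padding) by one recursive descent over the first four points that threads a remaining-slot counter, emits the 100000 padding at the base case and conses coordinates back-to-front; no distance tuples or intermediate filtered list exist.
import Mathlib
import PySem

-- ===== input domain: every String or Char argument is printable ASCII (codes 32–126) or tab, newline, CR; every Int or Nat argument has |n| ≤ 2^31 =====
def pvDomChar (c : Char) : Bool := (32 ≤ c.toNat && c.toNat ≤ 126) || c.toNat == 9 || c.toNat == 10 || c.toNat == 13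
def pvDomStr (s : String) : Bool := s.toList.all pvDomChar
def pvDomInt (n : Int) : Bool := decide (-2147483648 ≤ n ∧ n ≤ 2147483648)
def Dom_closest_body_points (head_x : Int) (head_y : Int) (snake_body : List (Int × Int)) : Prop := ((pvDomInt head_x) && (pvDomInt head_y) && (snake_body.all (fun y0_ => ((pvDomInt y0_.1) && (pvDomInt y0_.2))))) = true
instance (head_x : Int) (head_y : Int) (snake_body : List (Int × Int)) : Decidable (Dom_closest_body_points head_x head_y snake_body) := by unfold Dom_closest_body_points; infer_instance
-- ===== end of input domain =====

-- B replaces A's three staged passes (distance-tuple list, unpacking loop, padding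
-- while-loop) by one recursive descent threading a remaining-slot counter; objective: alternative.

-- ===== PORT A =====
-- helper: builds the list of (dist, x, y) triples for the first 4 body points
def distances_to_head (head_x : Int) (head_y : Int) (snake_body : List (Int × Int)) : List (Int × Int × Int) :=
  (PySem.List.slice snake_body none (some 4)).foldl
    (fun distances p =>
      let dist := (p.1 - head_x) ^ 2 + (p.2 - head_y) ^ 2
      if dist ≠ 0 then distances ++ [(dist, p.1, p.2)] else distances) []

-- the while-loop 'while len(closest_x) < 4: append 100_000 to both'
def pad_loop (closest_x : List Int) (closest_y : List Int) : List Int × List Int :=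
  if closest_x.length < 4 then pad_loop (closest_x ++ [100000]) (closest_y ++ [100000])
  else (closest_x, closest_y)
termination_by 4 - closest_x.length
decreasing_by simp; omega

def closest_body_points (head_x : Int) (head_y : Int) (snake_body : List (Int × Int)) : List Int × List Int :=
  let distances := distances_to_head head_x head_y snake_body
  -- 'if elem:' — a 3-tuple is always truthy in Python, so the branch is always taken
  let r := distances.foldl
    (fun (acc : List Int × List Int) elem => (acc.1 ++ [elem.2.1], acc.2 ++ [elem.2.2])) ([], [])
  pad_loop r.1 r.2

-- ===== PORT B =====
-- B's inner recursive 'go(pts, slots)'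
def cbp_go (head_x : Int) (head_y : Int) : List (Int × Int) → Nat → List Int × List Int
  | [], slots => (List.replicate slots 100000, List.replicate slots 100000)
  | (x, y) :: rest, slots =>
    if x = head_x ∧ y = head_y then cbp_go head_x head_y rest slots
    else
      let r := cbp_go head_x head_y rest (slots - 1)
      (x :: r.1, y :: r.2)

def closest_body_points_alt (head_x : Int) (head_y : Int) (snake_body : List (Int × Int)) : List Int × List Int :=
  cbp_go head_x head_y (PySem.List.slice snake_body none (some 4)) 4

-- ===== PRECONDITION & SPEC =====
def Spec_closest_body_points (head_x : Int) (head_y : Int) (snake_body : List (Int × Int)) (out : List Int × List Int) : Prop := out = closest_body_points_alt head_x head_y snake_body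
instance (head_x : Int) (head_y : Int) (snake_body : List (Int × Int)) (out : List Int × List Int) : Decidable (Spec_closest_body_points head_x head_y snake_body out) := by unfold Spec_closest_body_points; infer_instance

-- ===== CLAIM (what is proved, stated in full; the proofs are below) =====
def Claim_equal_closest_body_points : Prop := ∀ (head_x : Int) (head_y : Int) (snake_body : List (Int × Int)), Dom_closest_body_points head_x head_y snake_body → Spec_closest_body_points head_x head_y snake_body (closest_body_points head_x head_y snake_body)

-- ===== LEMMAS AND PROOFS =====

-- the skip-if-equal-to-head condition, named so simp keeps it intact (proofs only)
def keepP (hx hy : Int) (p : Int × Int) : Bool := !(decide (p.1 = hx ∧ p.2 = hy))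

-- squared distance is nonzero iff the point differs from the head
theorem pv_dist_key (hx hy x y : Int) :
    ((x - hx) ^ 2 + (y - hy) ^ 2 ≠ 0) ↔ ¬ (x = hx ∧ y = hy) := by
  constructor
  · intro h ⟨h1, h2⟩
    exact h (by subst h1; subst h2; ring)
  · intro h h0
    have h1 : (x - hx) ^ 2 = 0 := by nlinarith [sq_nonneg (x - hx), sq_nonneg (y - hy)]
    have h2 : (y - hy) ^ 2 = 0 := by nlinarith [sq_nonneg (x - hx), sq_nonneg (y - hy)]
    exact h ⟨by nlinarith, by nlinarith⟩

-- A's first pass is a map over the filtered list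
theorem pv_distances_eq (hx hy : Int) (l : List (Int × Int)) (acc : List (Int × Int × Int)) :
    l.foldl (fun distances p =>
      let dist := (p.1 - hx) ^ 2 + (p.2 - hy) ^ 2
      if dist ≠ 0 then distances ++ [(dist, p.1, p.2)] else distances) acc
    = acc ++ (l.filter (keepP hx hy)).map
        (fun p => ((p.1 - hx) ^ 2 + (p.2 - hy) ^ 2, p.1, p.2)) := by
  induction l generalizing acc with
  | nil => simp
  | cons a t ih =>
    simp only [List.foldl_cons]
    by_cases h : ((a.1 - hx) ^ 2 + (a.2 - hy) ^ 2 ≠ 0)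
    · have hb : keepP hx hy a = true := by
        simp [keepP, (pv_dist_key hx hy a.1 a.2).mp h]
      rw [if_pos h, ih]
      simp only [List.filter_cons, hb, if_pos rfl, List.map_cons]
      simp
    · have hb : keepP hx hy a = false := by
        simp only [keepP, Bool.not_eq_false', decide_eq_true_eq]
        exact not_not.mp (fun c => h ((pv_dist_key hx hy a.1 a.2).mpr c))
      rw [if_neg h, ih]
      simp only [List.filter_cons, hb]
      simp

-- A's second pass unzips the triple list
theorem pv_unzip_eq (ds : List (Int × Int × Int)) (acc : List Int × List Int) :
    ds.foldl (fun (acc : List Int × List Int) elem => (acc.1 ++ [elem.2.1], acc.2 ++ [elem.2.2])) acc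
    = (acc.1 ++ ds.map (fun e => e.2.1), acc.2 ++ ds.map (fun e => e.2.2)) := by
  induction ds generalizing acc with
  | nil => simp
  | cons a t ih => simp [ih]

-- A's while-loop pads with replicate
theorem pv_pad_eq (k : Nat) : ∀ (cx cy : List Int), cx.length = cy.length → 4 - cx.length = k →
    pad_loop cx cy = (cx ++ List.replicate k 100000, cy ++ List.replicate k 100000) := by
  induction k with
  | zero =>
    intro cx cy hlen hk
    rw [pad_loop, if_neg (by omega)]
    simp
  | succ n ih =>
    intro cx cy hlen hk
    rw [pad_loop, if_pos (by omega)]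
    rw [ih (cx ++ [100000]) (cy ++ [100000]) (by simp [hlen]) (by simp; omega)]
    simp [List.replicate_succ]

-- B's recursion computes filtered coordinates followed by the leftover padding
theorem pv_go_eq (hx hy : Int) (l : List (Int × Int)) : ∀ (slots : Nat),
    (l.filter (keepP hx hy)).length ≤ slots →
    cbp_go hx hy l slots =
      ((l.filter (keepP hx hy)).map Prod.fst
         ++ List.replicate (slots - (l.filter (keepP hx hy)).length) 100000,
       (l.filter (keepP hx hy)).map Prod.snd
         ++ List.replicate (slots - (l.filter (keepP hx hy)).length) 100000) := by
  induction l with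
  | nil => intro slots _; simp [cbp_go]
  | cons a t ih =>
    intro slots hle
    obtain ⟨x, y⟩ := a
    by_cases h : x = hx ∧ y = hy
    · have hb : keepP hx hy (x, y) = false := by simp [keepP, h]
      rw [List.filter_cons_of_neg (by simp [hb])] at hle ⊢
      simp only [cbp_go, if_pos h]
      exact ih slots hle
    · have hb : keepP hx hy (x, y) = true := by simp [keepP]; tauto
      rw [List.filter_cons_of_pos hb] at hle ⊢
      simp only [List.length_cons, List.map_cons] at hle ⊢
      simp only [cbp_go, if_neg h]
      rw [ih (slots - 1) (by omega)]
      have : slots - 1 - (List.filter (keepP hx hy) t).length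
           = slots - ((List.filter (keepP hx hy) t).length + 1) := by omega
      rw [this]
      simp

-- ===== VERDICT (by name: the statement is the Claim_ definition above) =====
theorem closest_body_points_spec : Claim_equal_closest_body_points := by
  intro hx hy body _
  show closest_body_points hx hy body = closest_body_points_alt hx hy body
  unfold closest_body_points closest_body_points_alt distances_to_head
  simp only [pv_distances_eq, pv_unzip_eq, List.nil_append, List.map_map]
  have hlen : ((PySem.List.slice body none (some 4)).filter
      (keepP hx hy)).length ≤ 4 := by
    calc _ ≤ (PySem.List.slice body none (some 4)).length := List.length_filter_le _ _
      _ ≤ 4 := by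
        have : PySem.List.slice body none (some 4) = body.take 4 := by
          simpa using PySem.List.slice_to_natCast body 4
        rw [this]; exact List.length_take_le _ _
  rw [pv_go_eq hx hy _ 4 hlen]
  rw [pv_pad_eq (4 - ((PySem.List.slice body none (some 4)).filter
      (keepP hx hy)).length) _ _ (by simp) (by simp)]
  simp [Function.comp]
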